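-- pv_equiv track=rewrite | github.com/nrohankar29/Python | Lapindromes.py | lapindrome
-- ===== SOURCE A (Python) =====
-- def lapindrome(s):
--
--     n = len(s)
--     s1 = s[:n//2]
--     if n % 2 == 0:
--         s2 = s[n//2:]
--     else:
--         s2 = s[(n//2)+1:]
--
--     for ch in set(s1):
--         if s1.count(ch) != s2.count(ch):
--             return("NO")
--             break
--     else:
--         return("YES")
-- ===== SOURCE B (Python) =====
-- def lapindrome(s):
--     n = len(s)
--     s1 = sorted(s[:n//2])
--     s2 = sorted(s[n//2 + n % 2:])
--     return "YES" if s1 == s2 else "NO"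
-- ===== Notes on version B (the rewrite author's own statement) =====
-- stated objective: simpler
-- what changed: Replaces the per-unique-character counting loop (set(s1) plus .count scans on both halves) with a branch-free half split and a single sort-then-compare of the two halves.
import Mathlib
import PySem

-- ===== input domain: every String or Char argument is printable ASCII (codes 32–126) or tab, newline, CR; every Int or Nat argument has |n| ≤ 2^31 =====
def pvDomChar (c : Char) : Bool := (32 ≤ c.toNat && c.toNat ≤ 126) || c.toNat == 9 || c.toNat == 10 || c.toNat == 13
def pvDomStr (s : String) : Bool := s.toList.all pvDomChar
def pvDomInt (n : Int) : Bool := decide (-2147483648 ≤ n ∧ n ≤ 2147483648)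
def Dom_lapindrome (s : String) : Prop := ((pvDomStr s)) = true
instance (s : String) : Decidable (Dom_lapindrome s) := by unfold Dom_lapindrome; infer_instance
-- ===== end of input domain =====

-- B replaces A's per-unique-character counting loop with a branch-free half split and sort-then-compare (simpler).

-- ===== PORT A =====
-- A's `for ch in set(s1): if s1.count(ch) != s2.count(ch): return "NO"` / `else: return "YES"` loop
def lapindromeLoop (s1 s2 : List Char) : List Char → String
  | [] => "YES"
  | ch :: rest =>
    if PySem.List.count s1 ch ≠ PySem.List.count s2 ch then "NO"
    else lapindromeLoop s1 s2 rest

def lapindrome (s : String) : String :=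
  let cs := s.toList
  let n : Int := cs.length
  let s1 := PySem.List.slice cs none (some (PySem.Int.floordiv n 2))
  let s2 :=
    if PySem.Int.mod n 2 = 0 then PySem.List.slice cs (some (PySem.Int.floordiv n 2)) none
    else PySem.List.slice cs (some (PySem.Int.floordiv n 2 + 1)) none
  lapindromeLoop s1 s2 (PySem.Set.ofList s1)

-- ===== PORT B =====
def lapindrome_alt (s : String) : String :=
  let cs := s.toList
  let n : Int := cs.length
  let s1 := PySem.List.sorted (PySem.List.slice cs none (some (PySem.Int.floordiv n 2))) (fun x => x) false
  let s2 := PySem.List.sorted (PySem.List.slice cs (some (PySem.Int.floordiv n 2 + PySem.Int.mod n 2)) none) (fun x => x) false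
  if s1 = s2 then "YES" else "NO"

-- ===== PRECONDITION & SPEC =====
def Spec_lapindrome (s : String) (out : String) : Prop := out = lapindrome_alt s
instance (s : String) (out : String) : Decidable (Spec_lapindrome s out) := by unfold Spec_lapindrome; infer_instance

-- ===== CLAIM (what is proved, stated in full; the proofs are below) =====
def Claim_equal_lapindrome : Prop := ∀ (s : String), Dom_lapindrome s → Spec_lapindrome s (lapindrome s)

-- ===== LEMMAS AND PROOFS =====

-- A's loop answers "YES" iff every char it visits has equal counts in the two halves
theorem lapindromeLoop_eq (s1 s2 : List Char) (l : List Char) :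
    lapindromeLoop s1 s2 l =
      if ∀ ch ∈ l, PySem.List.count s1 ch = PySem.List.count s2 ch then "YES" else "NO" := by
  induction l with
  | nil => simp [lapindromeLoop]
  | cons ch rest ih =>
    rw [lapindromeLoop, ih]
    by_cases h : PySem.List.count s1 ch = PySem.List.count s2 ch <;>
      simp_all [PySem.List.count_eq]

theorem list_sum_count (a : List Char) : ∑ x ∈ a.toFinset, a.count x = a.length := by
  have h := Multiset.toFinset_sum_count_eq (↑a : Multiset Char)
  simpa using h

-- equal lengths + equal counts for every char OF a ⇒ permutation
theorem perm_of_counts_left (a b : List Char) (hl : a.length = b.length)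
    (h : ∀ ch ∈ a, a.count ch = b.count ch) : a.Perm b := by
  rw [List.perm_iff_count]
  intro ch
  by_cases hch : ch ∈ a
  · exact h ch hch
  · rw [List.count_eq_zero_of_not_mem hch]
    by_contra hb
    have hbpos : 0 < b.count ch := Nat.pos_of_ne_zero (fun e => hb e.symm)
    have hsub : a.toFinset ⊆ b.toFinset := by
      intro x hx
      rw [List.mem_toFinset] at hx ⊢
      have hc : 0 < b.count x := by
        rw [← h x hx]; exact List.count_pos_iff.mpr hx
      exact List.count_pos_iff.mp hc
    have hlt : ∑ x ∈ a.toFinset, b.count x < ∑ x ∈ b.toFinset, b.count x := by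
      refine Finset.sum_lt_sum_of_subset hsub ?_ ?_ hbpos (fun _ _ _ => Nat.zero_le _)
      · exact List.mem_toFinset.mpr (List.count_pos_iff.mp hbpos)
      · exact fun hm => hch (List.mem_toFinset.mp hm)
    have h1 : ∑ x ∈ a.toFinset, b.count x = a.length := by
      rw [← list_sum_count a]
      exact Finset.sum_congr rfl (fun x hx => (h x (List.mem_toFinset.mp hx)).symm)
    rw [h1, list_sum_count, hl] at hlt
    exact lt_irrefl _ hlt

-- the bridge: A's count test over set(s1) ⟺ B's sorted comparison, given equal half lengths
theorem loop_eq_sorted (a b : List Char) (hl : a.length = b.length) :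
    lapindromeLoop a b (PySem.Set.ofList a) =
      if PySem.List.sorted a (fun x => x) false = PySem.List.sorted b (fun x => x) false
      then "YES" else "NO" := by
  rw [lapindromeLoop_eq]
  have hiff : (∀ ch ∈ PySem.Set.ofList a, PySem.List.count a ch = PySem.List.count b ch) ↔
      PySem.List.sorted a (fun x => x) false = PySem.List.sorted b (fun x => x) false := by
    rw [PySem.List.sorted_id_eq_sorted_id_iff_perm]
    constructor
    · intro h
      refine perm_of_counts_left a b hl (fun ch hch => ?_)
      have := h ch (by simpa [PySem.Set.mem_ofList] using hch)
      simpa [PySem.List.count_eq] using this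
    · intro hp ch _
      simpa [PySem.List.count_eq] using hp.count_eq ch
  simp only [hiff]

-- ===== VERDICT (by name: the statement is the Claim_ definition above) =====
theorem lapindrome_spec : Claim_equal_lapindrome := by
  intro s _
  unfold Spec_lapindrome lapindrome lapindrome_alt
  set cs := s.toList with hcs
  have hfd : PySem.Int.floordiv (cs.length : Int) 2 = ((cs.length / 2 : Nat) : Int) := by
    exact_mod_cast PySem.Int.floordiv_natCast cs.length 2
  have hmd : PySem.Int.mod (cs.length : Int) 2 = ((cs.length % 2 : Nat) : Int) := by
    exact_mod_cast PySem.Int.mod_natCast cs.length 2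
  have hc1 : ((cs.length / 2 : Nat) : Int) + 1 = ((cs.length / 2 + 1 : Nat) : Int) := by
    push_cast; ring
  have hc2 : ((cs.length / 2 : Nat) : Int) + ((cs.length % 2 : Nat) : Int)
      = ((cs.length / 2 + cs.length % 2 : Nat) : Int) := by
    push_cast; ring
  simp only [hfd, hmd, hc1, hc2, PySem.List.slice_to_natCast, PySem.List.slice_from_natCast]
  by_cases hpar : cs.length % 2 = 0
  · simp only [hpar, Nat.cast_zero, Nat.add_zero, if_pos]
    refine loop_eq_sorted _ _ ?_
    simp only [List.length_take, List.length_drop]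
    omega
  · have hone : cs.length % 2 = 1 := by omega
    rw [if_neg (by simp [hone]), hone]
    refine loop_eq_sorted _ _ ?_
    simp only [List.length_take, List.length_drop]
    omega
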